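-- pv_equiv track=rewrite | github.com/Dalton2333/postprocessing | utilities/abaqus/inp_reader_v2.py | get_key_value_from_tokens
-- ===== SOURCE A (Python) =====
-- def get_key_value_from_tokens(tokens):
-- 	""" Converts a list of tokens into a single key/value pair.
--
-- 	:param tokens:	The tokens, as strings.
-- 	:type tokens:	[str]
-- 	:returns:		(key, value)
-- 	:rtype:			(string, string)
-- 	"""
-- 	key_tokens 			= []
-- 	value_tokens 		= []
-- 	found_equals_sign 	= False
--
-- 	for token in tokens:
-- 		# Mark and skip the equals sign.
-- 		if token == "=":
-- 			found_equals_sign = True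
-- 			continue
-- 		if not found_equals_sign:
-- 			key_tokens.append(token)
-- 		else:
-- 			value_tokens.append(token)
--
-- 	# Combine the tokens into a string
-- 	if len(key_tokens) == 0:
-- 		key = None
-- 	else:
-- 		key	= "".join(key_tokens)
--
-- 	if len(value_tokens) == 0:
-- 		value = None
-- 	else:
-- 		value = "".join(value_tokens)
-- 	return (key, value)
-- ===== SOURCE B (Python) =====
-- def get_key_value_from_tokens(tokens):
-- 	""" Converts a list of tokens into a single key/value pair.
--
-- 	Index-then-slice decomposition: locate the first '=', slice the key out,
-- 	and filter further '=' signs out of the value slice.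
-- 	"""
-- 	if "=" not in tokens:
-- 		key_tokens = tokens
-- 		value_tokens = []
-- 	else:
-- 		i = tokens.index("=")
-- 		key_tokens = tokens[:i]
-- 		value_tokens = [t for t in tokens[i + 1:] if t != "="]
-- 	key = "".join(key_tokens) if key_tokens else None
-- 	value = "".join(value_tokens) if value_tokens else None
-- 	return (key, value)
-- ===== Notes on version B (the rewrite author's own statement) =====
-- stated objective: simpler
-- what changed: Replaced the flag-driven single accumulation pass with an index-then-slice decomposition: find the first '=', take the prefix as the key, filter remaining '=' out of the suffix as the value.
import Mathlib
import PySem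

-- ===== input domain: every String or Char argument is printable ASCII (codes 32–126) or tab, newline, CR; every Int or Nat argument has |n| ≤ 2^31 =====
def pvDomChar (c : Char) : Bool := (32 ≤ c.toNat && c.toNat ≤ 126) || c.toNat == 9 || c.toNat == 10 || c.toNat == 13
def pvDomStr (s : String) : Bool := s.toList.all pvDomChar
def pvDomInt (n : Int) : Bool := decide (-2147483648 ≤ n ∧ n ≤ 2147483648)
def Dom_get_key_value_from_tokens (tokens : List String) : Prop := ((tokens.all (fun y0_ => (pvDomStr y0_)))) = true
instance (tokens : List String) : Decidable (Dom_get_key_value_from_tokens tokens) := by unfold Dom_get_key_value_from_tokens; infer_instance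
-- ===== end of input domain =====

-- B replaces A's flag-driven single accumulation pass by an index-then-slice
-- decomposition (prefix before first '=' is the key, the suffix filtered of '='
-- is the value); objective: simpler.

-- ===== PORT A =====
-- state: (key_tokens, value_tokens, found_equals_sign)
def pvStepA (s : List String × List String × Bool) (token : String) :
    List String × List String × Bool :=
  if token = "=" then (s.1, s.2.1, true)
  else if s.2.2 = false then (s.1 ++ [token], s.2.1, s.2.2)
  else (s.1, s.2.1 ++ [token], s.2.2)

def get_key_value_from_tokens (tokens : List String) : Option String × Option String :=
  let st := tokens.foldl pvStepA ([], [], false)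
  ((if st.1.length = 0 then none else some (PySem.Str.join "" st.1)),
   (if st.2.1.length = 0 then none else some (PySem.Str.join "" st.2.1)))

-- ===== PORT B =====
def get_key_value_from_tokens_alt (tokens : List String) : Option String × Option String :=
  let p : List String × List String :=
    match PySem.List.index? tokens "=" with
    | none => (tokens, [])                          -- "=" not in tokens
    | some i => (tokens.take i, (tokens.drop (i + 1)).filter (fun t => t ≠ "="))
  ((if p.1.isEmpty then none else some (PySem.Str.join "" p.1)),
   (if p.2.isEmpty then none else some (PySem.Str.join "" p.2)))

-- ===== PRECONDITION & SPEC =====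
def Spec_get_key_value_from_tokens (tokens : List String) (out : Option String × Option String) : Prop := out = get_key_value_from_tokens_alt tokens
instance (tokens : List String) (out : Option String × Option String) : Decidable (Spec_get_key_value_from_tokens tokens out) := by unfold Spec_get_key_value_from_tokens; infer_instance

-- ===== CLAIM (what is proved, stated in full; the proofs are below) =====
def Claim_equal_get_key_value_from_tokens : Prop := ∀ (tokens : List String), Dom_get_key_value_from_tokens tokens → Spec_get_key_value_from_tokens tokens (get_key_value_from_tokens tokens)

-- ===== LEMMAS AND PROOFS =====

-- After the flag is set, A only appends non-'=' tokens to value_tokens.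
theorem pv_fold_after (ts : List String) (k v : List String) :
    ts.foldl pvStepA (k, v, true) = (k, v ++ ts.filter (fun t => t ≠ "="), true) := by
  induction ts generalizing v with
  | nil => simp
  | cons t ts ih =>
    by_cases h : t = "="
    · simp [pvStepA, h, ih]
    · simp [pvStepA, h, ih, List.append_assoc]

-- Before the flag is set, A accumulates the prefix up to the first '='.
theorem pv_fold_before (ts : List String) (k : List String) :
    ts.foldl pvStepA (k, [], false) =
      match PySem.List.index? ts "=" with
      | none => (k ++ ts, [], false)
      | some i => (k ++ ts.take i, (ts.drop (i + 1)).filter (fun t => t ≠ "="), true) := by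
  induction ts generalizing k with
  | nil => simp
  | cons t ts ih =>
    by_cases h : t = "="
    · subst h
      simp [pvStepA, pv_fold_after, List.idxOf?_cons]
    · have step : (t :: ts).foldl pvStepA (k, [], false) = ts.foldl pvStepA (k ++ [t], [], false) := by
        simp [pvStepA, h]
      rw [step, ih]
      cases hidx : PySem.List.index? ts "=" with
      | none =>
        have : List.idxOf? "=" ts = none := by simpa using hidx
        simp [List.idxOf?_cons, h, this]
      | some i =>
        have : List.idxOf? "=" ts = some i := by simpa using hidx
        simp [List.idxOf?_cons, h, this, List.append_assoc]

-- ===== VERDICT (by name: the statement is the Claim_ definition above) =====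
theorem get_key_value_from_tokens_spec : Claim_equal_get_key_value_from_tokens := by
  intro tokens _
  unfold Spec_get_key_value_from_tokens get_key_value_from_tokens get_key_value_from_tokens_alt
  rw [pv_fold_before tokens []]
  cases hidx : PySem.List.index? tokens "=" with
  | none => simp [List.isEmpty_iff, List.length_eq_zero_iff]
  | some i => simp [List.isEmpty_iff, List.length_eq_zero_iff]
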